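-- pv_equiv track=rewrite | github.com/fcheltso/toric-graph-computations | src/primitive_walks.py | is_connected_eulerian_even
-- ===== SOURCE A (Python) =====
-- from collections import defaultdict, Counter, deque
-- from typing import List, Tuple, Dict, Set
--
-- Edge = Tuple[int, int]
--
-- def is_connected_eulerian_even(edge_multiset: Counter[Edge]) -> bool:
--     """
--     Check whether the multigraph is connected on its support, has all degrees even,
--     and has an even number of edges.
--     """
--     total_edges = sum(edge_multiset.values())
--     if total_edges == 0 or total_edges % 2 != 0:
--         return False
--
--     deg: Dict[int, int] = defaultdict(int)
--     neigh: Dict[int, Set[int]] = defaultdict(set)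
--
--     for (u, v), m in edge_multiset.items():
--         if m <= 0:
--             continue
--         deg[u] += m
--         deg[v] += m
--         neigh[u].add(v)
--         neigh[v].add(u)
--
--     support = [v for v, d in deg.items() if d > 0]
--     if not support:
--         return False
--
--     if any(deg[v] % 2 != 0 for v in support):
--         return False
--
--     # Check connectivity on the underlying simple graph.
--     start = support[0]
--     seen = {start}
--     q = deque([start])
--     while q:
--         x = q.popleft()
--         for y in neigh[x]:
--             if y not in seen:
--                 seen.add(y)
--                 q.append(y)
--
--     return all(v in seen for v in support)
-- ===== SOURCE B (Python) =====
-- def is_connected_eulerian_even(edge_multiset):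
--     """Same checks as A, but connectivity via repeated edge-relaxation to a
--     fixpoint over the edge list itself -- no adjacency sets, no BFS queue."""
--     total = sum(edge_multiset.values())
--     if total == 0 or total % 2 != 0:
--         return False
--
--     deg = {}
--     for (u, v), m in edge_multiset.items():
--         if m > 0:
--             deg[u] = deg.get(u, 0) + m
--             deg[v] = deg.get(v, 0) + m
--
--     if not deg:
--         return False
--     if any(d % 2 != 0 for d in deg.values()):
--         return False
--
--     seen = {next(iter(deg))}
--     grew = True
--     while grew:
--         grew = False
--         for (u, v), m in edge_multiset.items():
--             if m > 0:
--                 if u in seen and v not in seen: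
--                     seen.add(v)
--                     grew = True
--                 if v in seen and u not in seen:
--                     seen.add(u)
--                     grew = True
--     return all(v in seen for v in deg)
-- ===== Notes on version B (the rewrite author's own statement) =====
-- stated objective: alternative
-- what changed: The adjacency-set dict + BFS queue connectivity test is replaced by repeated edge-relaxation to a fixpoint directly over the edge list (no adjacency structure, no queue), and the vacuous d>0 support filter is dropped in favour of using the degree dict's keys directly.
import Mathlib
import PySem

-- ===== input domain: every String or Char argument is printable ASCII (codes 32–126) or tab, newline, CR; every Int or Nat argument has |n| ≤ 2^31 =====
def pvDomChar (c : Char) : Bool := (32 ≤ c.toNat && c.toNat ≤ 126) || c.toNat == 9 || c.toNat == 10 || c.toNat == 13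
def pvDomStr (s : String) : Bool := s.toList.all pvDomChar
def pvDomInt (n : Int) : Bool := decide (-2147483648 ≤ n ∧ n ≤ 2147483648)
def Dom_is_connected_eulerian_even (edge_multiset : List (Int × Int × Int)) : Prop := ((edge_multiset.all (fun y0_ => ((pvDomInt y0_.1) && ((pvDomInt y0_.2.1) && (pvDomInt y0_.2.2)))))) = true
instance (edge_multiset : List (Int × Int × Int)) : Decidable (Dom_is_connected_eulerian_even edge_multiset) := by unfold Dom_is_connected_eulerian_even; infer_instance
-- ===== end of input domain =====

-- B replaces A's adjacency-set dict + BFS-queue connectivity test by repeated edge-relaxation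
-- over the edge list itself (alternative decomposition; not claimed faster).

-- ===== PORT A =====
-- loop body of A's "for (u, v), m in edge_multiset.items()" (builds deg and neigh)
def pvStepA (st : PySem.Dict Int Int × PySem.Dict Int (PySem.Set Int)) (e : Int × Int × Int) :
    PySem.Dict Int Int × PySem.Dict Int (PySem.Set Int) :=
  if e.2.2 ≤ 0 then st
  else
    let d1 := st.1.insert e.1 (st.1.getD e.1 0 + e.2.2)
    let d2 := d1.insert e.2.1 (d1.getD e.2.1 0 + e.2.2)
    let n1 := st.2.insert e.1 (PySem.Set.add (st.2.getD e.1 PySem.Set.empty) e.2.1)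
    let n2 := n1.insert e.2.1 (PySem.Set.add (n1.getD e.2.1 PySem.Set.empty) e.1)
    (d2, n2)

-- A's BFS "while q:" loop; fuel bounds the number of iterations (proved sufficient below)
def pvBfs (neigh : PySem.Dict Int (PySem.Set Int)) :
    Nat → PySem.Set Int → List Int → PySem.Set Int
  | 0, seen, _ => seen
  | fuel+1, seen, q =>
    match q with
    | [] => seen
    | x :: q' =>
      let st := (neigh.getD x PySem.Set.empty).foldl
        (fun (st : PySem.Set Int × List Int) y =>
          if PySem.Set.contains st.1 y then st else (PySem.Set.add st.1 y, st.2 ++ [y]))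
        (seen, q')
      pvBfs neigh fuel st.1 st.2

def is_connected_eulerian_even (edge_multiset : List (Int × Int × Int)) : Bool :=
  let total := (edge_multiset.map (fun e => e.2.2)).sum
  if total == 0 || PySem.Int.mod total 2 != 0 then false
  else
    let dn := edge_multiset.foldl pvStepA (PySem.Dict.empty, PySem.Dict.empty)
    let deg := dn.1
    let neigh := dn.2
    let support := (deg.items.filter (fun p => decide (0 < p.2))).map (fun p => p.1)
    match support with
    | [] => false
    | start :: _ =>
      if support.any (fun v => PySem.Int.mod (deg.getD v 0) 2 != 0) then false
      else
        let seen := pvBfs neigh (4 * edge_multiset.length + 2)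
          (PySem.Set.ofList [start]) [start]
        support.all (fun v => PySem.Set.contains seen v)

-- ===== PORT B =====
-- loop body of B's degree accumulation
def pvStepB (d : PySem.Dict Int Int) (e : Int × Int × Int) : PySem.Dict Int Int :=
  if 0 < e.2.2 then
    let d1 := d.insert e.1 (d.getD e.1 0 + e.2.2)
    d1.insert e.2.1 (d1.getD e.2.1 0 + e.2.2)
  else d

-- loop body of B's inner "for (u, v), m in edge_multiset.items()" relaxation pass
def pvRelaxStep (st : PySem.Set Int × Bool) (e : Int × Int × Int) : PySem.Set Int × Bool :=
  if 0 < e.2.2 then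
    let st1 := if PySem.Set.contains st.1 e.1 && !PySem.Set.contains st.1 e.2.1 then
        (PySem.Set.add st.1 e.2.1, true) else st
    if PySem.Set.contains st1.1 e.2.1 && !PySem.Set.contains st1.1 e.1 then
      (PySem.Set.add st1.1 e.1, true) else st1
  else st

-- B's relaxation pass over all edges
def pvRelaxPass (edge_multiset : List (Int × Int × Int)) (seen : PySem.Set Int) :
    PySem.Set Int × Bool :=
  edge_multiset.foldl pvRelaxStep (seen, false)

-- B's "while grew:" loop; fuel bounds the number of passes (proved sufficient below)
def pvClose (edge_multiset : List (Int × Int × Int)) : Nat → PySem.Set Int → PySem.Set Int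
  | 0, seen => seen
  | fuel+1, seen =>
    let st := pvRelaxPass edge_multiset seen
    if st.2 then pvClose edge_multiset fuel st.1 else st.1

def is_connected_eulerian_even_alt (edge_multiset : List (Int × Int × Int)) : Bool :=
  let total := (edge_multiset.map (fun e => e.2.2)).sum
  if total == 0 || PySem.Int.mod total 2 != 0 then false
  else
    let deg := edge_multiset.foldl pvStepB PySem.Dict.empty
    match deg.keys with
    | [] => false
    | start :: _ =>
      if deg.values.any (fun d => PySem.Int.mod d 2 != 0) then false
      else
        let seen := pvClose edge_multiset (2 * edge_multiset.length + 2)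
          (PySem.Set.ofList [start])
        deg.keys.all (fun v => PySem.Set.contains seen v)

-- ===== PRECONDITION & SPEC =====
def Spec_is_connected_eulerian_even (edge_multiset : List (Int × Int × Int)) (out : Bool) : Prop := out = is_connected_eulerian_even_alt edge_multiset
instance (edge_multiset : List (Int × Int × Int)) (out : Bool) : Decidable (Spec_is_connected_eulerian_even edge_multiset out) := by unfold Spec_is_connected_eulerian_even; infer_instance

-- ===== CLAIM (what is proved, stated in full; the proofs are below) =====
def Claim_equal_is_connected_eulerian_even : Prop := ∀ (edge_multiset : List (Int × Int × Int)), Dom_is_connected_eulerian_even edge_multiset → Spec_is_connected_eulerian_even edge_multiset (is_connected_eulerian_even edge_multiset)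

-- ===== LEMMAS AND PROOFS =====

-- the simple-graph adjacency relation of the positive-multiplicity edges
def pvRel (l : List (Int × Int × Int)) (x y : Int) : Prop :=
  ∃ e ∈ l, 0 < e.2.2 ∧ ((e.1 = x ∧ e.2.1 = y) ∨ (e.1 = y ∧ e.2.1 = x))

def pvReach (l : List (Int × Int × Int)) (s v : Int) : Prop :=
  Relation.ReflTransGen (pvRel l) s v

-- the vertex set (support) of the positive edges
def pvV (l : List (Int × Int × Int)) : PySem.Set Int :=
  PySem.Set.ofList (l.flatMap (fun e => if 0 < e.2.2 then [e.1, e.2.1] else []))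

def pvCnt (l : List (Int × Int × Int)) (seen : PySem.Set Int) : Nat :=
  ((pvV l).filter (fun v => !PySem.Set.contains seen v)).length

theorem mem_pvV {l : List (Int × Int × Int)} {v : Int} :
    v ∈ pvV l ↔ ∃ e ∈ l, 0 < e.2.2 ∧ (e.1 = v ∨ e.2.1 = v) := by
  simp only [pvV, PySem.Set.mem_ofList, List.mem_flatMap]
  constructor
  · rintro ⟨e, he, hm⟩
    by_cases hp : 0 < e.2.2
    · simp only [if_pos hp] at hm
      simp only [List.mem_cons, List.not_mem_nil, or_false] at hm
      rcases hm with h | h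
      · exact ⟨e, he, hp, Or.inl h.symm⟩
      · exact ⟨e, he, hp, Or.inr h.symm⟩
    · simp [if_neg hp] at hm
  · rintro ⟨e, he, hm, h | h⟩
    · exact ⟨e, he, by simp only [if_pos hm]; simp [h]⟩
    · exact ⟨e, he, by simp only [if_pos hm]; simp [h]⟩

theorem nodup_pvV (l : List (Int × Int × Int)) : (pvV l).Nodup := by
  exact PySem.Set.nodup_ofList _

theorem length_pvV_le (l : List (Int × Int × Int)) : (pvV l).length ≤ 2 * l.length := by
  refine le_trans (PySem.Set.length_ofList_le _) ?_
  induction l with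
  | nil => simp
  | cons e t ih =>
    simp only [List.flatMap_cons, List.length_append, List.length_cons]
    split <;> simp only [List.length_cons, List.length_nil] <;> omega

theorem pvRel_mem_right {l : List (Int × Int × Int)} {x y : Int} (h : pvRel l x y) :
    y ∈ pvV l := by
  rcases h with ⟨e, he, hm, h⟩
  rcases h with ⟨h1, h2⟩ | ⟨h1, h2⟩
  · exact mem_pvV.2 ⟨e, he, hm, Or.inr h2⟩
  · exact mem_pvV.2 ⟨e, he, hm, Or.inl h1⟩

theorem pvCnt_le (l : List (Int × Int × Int)) (seen : PySem.Set Int) :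
    pvCnt l seen ≤ 2 * l.length := by
  exact le_trans (List.length_filter_le _ _) (length_pvV_le l)

theorem pvCnt_step {l : List (Int × Int × Int)} {seen : PySem.Set Int} {y : Int}
    (hV : y ∈ pvV l) (hy : y ∉ seen) :
    pvCnt l (seen ++ [y]) + 1 = pvCnt l seen := by
  unfold pvCnt
  have hnd := nodup_pvV l
  have h1 : ((pvV l).filter (fun v => !PySem.Set.contains (seen ++ [y]) v)) =
      ((pvV l).filter (fun v => !PySem.Set.contains seen v)).filter (fun v => !(v == y)) := by
    rw [List.filter_filter]
    apply List.filter_congr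
    intro v _
    simp only [PySem.Set.contains_eq_listContains, List.contains_eq_mem,
      List.mem_append, List.mem_singleton]
    by_cases hv : v = y <;> by_cases hs : v ∈ seen <;> simp [hv, hs]
  rw [h1]
  have h2 : ((pvV l).filter (fun v => !PySem.Set.contains seen v)).filter (fun v => !(v == y)) =
      ((pvV l).filter (fun v => !PySem.Set.contains seen v)).erase y := by
    rw [List.Nodup.erase_eq_filter (List.Nodup.filter _ hnd)]
    apply List.filter_congr
    intro v _
    simp [bne]
  rw [h2]
  have hy' : y ∈ (pvV l).filter (fun v => !PySem.Set.contains seen v) := by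
    simp only [List.mem_filter, Bool.not_eq_true']
    exact ⟨hV, by simpa [PySem.Set.contains_iff] using hy⟩
  rw [List.length_erase_of_mem hy']
  have := List.length_pos_of_mem hy'
  omega

theorem pvReach_closed {l : List (Int × Int × Int)} {S : List Int} {start v : Int}
    (hs : start ∈ S) (hc : ∀ x ∈ S, ∀ y, pvRel l x y → y ∈ S)
    (h : pvReach l start v) : v ∈ S := by
  induction h with
  | refl => exact hs
  | tail _ hstep ih => exact hc _ ih _ hstep

-- ===== degree dictionary =====
theorem degA_eq_degB (l : List (Int × Int × Int))
    (d : PySem.Dict Int Int) (n : PySem.Dict Int (PySem.Set Int)) :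
    (l.foldl pvStepA (d, n)).1 = l.foldl pvStepB d := by
  induction l generalizing d n with
  | nil => rfl
  | cons e t ih =>
    simp only [List.foldl_cons]
    by_cases h : e.2.2 ≤ 0
    · rw [show pvStepA (d, n) e = (d, n) by simp [pvStepA, h],
        show pvStepB d e = d by simp [pvStepB]; omega]
      exact ih d n
    · rw [show pvStepA (d, n) e = (pvStepB d e,
        ((d, n).2.insert e.1 (PySem.Set.add ((d, n).2.getD e.1 PySem.Set.empty) e.2.1)).insert
          e.2.1 (PySem.Set.add
            (((d, n).2.insert e.1 (PySem.Set.add ((d, n).2.getD e.1 PySem.Set.empty) e.2.1)).getD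
              e.2.1 PySem.Set.empty) e.1)) by
          simp [pvStepA, pvStepB, h, show 0 < e.2.2 by omega]]
      exact ih _ _

theorem nodup_keys_degB (l : List (Int × Int × Int)) (d : PySem.Dict Int Int)
    (hd : d.keys.Nodup) : (l.foldl pvStepB d).keys.Nodup := by
  induction l generalizing d with
  | nil => exact hd
  | cons e t ih =>
    simp only [List.foldl_cons]
    apply ih
    unfold pvStepB
    split
    · exact PySem.Dict.nodup_keys_insert _ _ _ (PySem.Dict.nodup_keys_insert _ _ _ hd)
    · exact hd

theorem pos_degB (l : List (Int × Int × Int)) (d : PySem.Dict Int Int)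
    (h0 : ∀ v, 0 ≤ d.getD v 0) (hp : ∀ v ∈ d.keys, 0 < d.getD v 0) :
    (∀ v, 0 ≤ (l.foldl pvStepB d).getD v 0) ∧
      (∀ v ∈ (l.foldl pvStepB d).keys, 0 < (l.foldl pvStepB d).getD v 0) := by
  induction l generalizing d with
  | nil => exact ⟨h0, hp⟩
  | cons e t ih =>
    simp only [List.foldl_cons]
    apply ih
    · intro v
      unfold pvStepB
      by_cases h : 0 < e.2.2
      · simp only [if_pos h, PySem.Dict.getD_insert]
        have h1 := h0 e.1; have h2 := h0 e.2.1; have h3 := h0 v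
        split_ifs <;> omega
      · simp only [if_neg h]; exact h0 v
    · intro v hv
      unfold pvStepB at hv ⊢
      by_cases h : 0 < e.2.2
      · simp only [if_pos h, PySem.Dict.getD_insert, PySem.Dict.mem_keys_insert] at hv ⊢
        have h1 := h0 e.1; have h2 := h0 e.2.1
        rcases hv with h3 | h3 | h3
        · subst h3; split_ifs <;> omega
        · subst h3; split_ifs <;> omega
        · have := hp v h3; split_ifs <;> omega
      · simp only [if_neg h] at hv ⊢
        exact hp v hv

theorem support_eq_keys (l : List (Int × Int × Int)) :
    (((l.foldl pvStepB PySem.Dict.empty).items.filter (fun p => decide (0 < p.2))).map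
        (fun p => p.1)) = (l.foldl pvStepB PySem.Dict.empty).keys := by
  have hnd : (l.foldl pvStepB PySem.Dict.empty).keys.Nodup := by
    apply nodup_keys_degB
    simp [PySem.Dict.keys_empty]
  have hpos := (pos_degB l PySem.Dict.empty (by simp [PySem.Dict.getD_empty])
    (by simp [PySem.Dict.keys_empty])).2
  rw [PySem.Dict.items_eq_map_keys _ hnd 0]
  rw [List.filter_map]
  have : ((l.foldl pvStepB PySem.Dict.empty).keys.filter
      ((fun p => decide (0 < p.2)) ∘ (fun k => (k, (l.foldl pvStepB PySem.Dict.empty).getD k 0))))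
      = (l.foldl pvStepB PySem.Dict.empty).keys := by
    apply List.filter_eq_self.2
    intro k hk
    simpa using hpos k hk
  rw [this, List.map_map]
  simp [Function.comp_def]

-- ===== A's neighbour dictionary =====
theorem mem_neighA (l : List (Int × Int × Int))
    (d : PySem.Dict Int Int) (n : PySem.Dict Int (PySem.Set Int)) (Q : Int → Int → Prop)
    (hn : ∀ x y, y ∈ n.getD x PySem.Set.empty ↔ Q x y) :
    ∀ x y, y ∈ (l.foldl pvStepA (d, n)).2.getD x PySem.Set.empty ↔ (Q x y ∨ pvRel l x y) := by
  induction l generalizing d n Q with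
  | nil =>
    intro x y
    simp only [List.foldl_nil]
    rw [hn]
    simp [pvRel]
  | cons e t ih =>
    intro x y
    simp only [List.foldl_cons]
    have hrel : ∀ x y, pvRel (e :: t) x y ↔
        ((0 < e.2.2 ∧ ((e.1 = x ∧ e.2.1 = y) ∨ (e.1 = y ∧ e.2.1 = x))) ∨ pvRel t x y) := by
      intro x y
      simp only [pvRel, List.mem_cons]
      constructor
      · rintro ⟨e', he' | he', hm, ho⟩
        · subst he'; exact Or.inl ⟨hm, ho⟩
        · exact Or.inr ⟨e', he', hm, ho⟩
      · rintro (⟨hm, ho⟩ | ⟨e', he', hm, ho⟩)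
        · exact ⟨e, Or.inl rfl, hm, ho⟩
        · exact ⟨e', Or.inr he', hm, ho⟩
    by_cases h : e.2.2 ≤ 0
    · rw [show pvStepA (d, n) e = (d, n) from by simp [pvStepA, h]]
      rw [ih d n Q hn x y]
      have : ¬ (0 < e.2.2) := by omega
      simp only [hrel]
      tauto
    · have hm : 0 < e.2.2 := by omega
      rw [show pvStepA (d, n) e = ((d.insert e.1 (d.getD e.1 0 + e.2.2)).insert e.2.1 ((d.insert e.1 (d.getD e.1 0 + e.2.2)).getD e.2.1 0 + e.2.2), (n.insert e.1 (PySem.Set.add (n.getD e.1 PySem.Set.empty) e.2.1)).insert e.2.1 (PySem.Set.add ((n.insert e.1 (PySem.Set.add (n.getD e.1 PySem.Set.empty) e.2.1)).getD e.2.1 PySem.Set.empty) e.1)) from by simp [pvStepA, h]]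
      have key : ∀ x y, y ∈ ((n.insert e.1 (PySem.Set.add (n.getD e.1 PySem.Set.empty) e.2.1)).insert e.2.1 (PySem.Set.add ((n.insert e.1 (PySem.Set.add (n.getD e.1 PySem.Set.empty) e.2.1)).getD e.2.1 PySem.Set.empty) e.1)).getD x PySem.Set.empty ↔
          (Q x y ∨ ((x = e.1 ∧ y = e.2.1) ∨ (x = e.2.1 ∧ y = e.1))) := by
        intro x y
        simp only [PySem.Dict.getD_insert]
        split_ifs with h1 h2 h3
        · subst h1; rw [h2]; simp only [PySem.Set.mem_add, hn]; tauto
        · subst h1; simp only [PySem.Set.mem_add, hn]; tauto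
        · subst h3; simp only [PySem.Set.mem_add, hn]; tauto
        · simp only [hn]; tauto
      rw [ih _ _ _ key x y]
      simp only [hrel, hm, true_and]
      constructor
      · rintro ((hq | ⟨h1, h2⟩ | ⟨h1, h2⟩) | hr)
        · exact Or.inl hq
        · exact Or.inr (Or.inl (Or.inl ⟨h1.symm, h2.symm⟩))
        · exact Or.inr (Or.inl (Or.inr ⟨h2.symm, h1.symm⟩))
        · exact Or.inr (Or.inr hr)
      · rintro (hq | (⟨h1, h2⟩ | ⟨h1, h2⟩) | hr)
        · exact Or.inl (Or.inl hq)
        · exact Or.inl (Or.inr (Or.inl ⟨h1.symm, h2.symm⟩))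
        · exact Or.inl (Or.inr (Or.inr ⟨h2.symm, h1.symm⟩))
        · exact Or.inr hr

-- ===== A's BFS =====
theorem bfs_inner (l : List (Int × Int × Int)) (ys : List Int)
    (seen : PySem.Set Int) (q : List Int)
    (hq : ∀ x ∈ q, x ∈ seen) (hqn : q.Nodup) (hsn : seen.Nodup) :
    (∀ v, v ∈ (ys.foldl (fun (st : PySem.Set Int × List Int) y =>
        if PySem.Set.contains st.1 y then st else (PySem.Set.add st.1 y, st.2 ++ [y]))
        (seen, q)).1 ↔ v ∈ seen ∨ v ∈ ys) ∧
    (∀ v ∈ (ys.foldl (fun (st : PySem.Set Int × List Int) y =>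
        if PySem.Set.contains st.1 y then st else (PySem.Set.add st.1 y, st.2 ++ [y]))
        (seen, q)).2, v ∈ q ∨ v ∈ ys) ∧
    (∀ v ∈ q, v ∈ (ys.foldl (fun (st : PySem.Set Int × List Int) y =>
        if PySem.Set.contains st.1 y then st else (PySem.Set.add st.1 y, st.2 ++ [y]))
        (seen, q)).2) ∧
    (∀ v ∈ (ys.foldl (fun (st : PySem.Set Int × List Int) y =>
        if PySem.Set.contains st.1 y then st else (PySem.Set.add st.1 y, st.2 ++ [y]))
        (seen, q)).2, v ∈ (ys.foldl (fun (st : PySem.Set Int × List Int) y =>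
        if PySem.Set.contains st.1 y then st else (PySem.Set.add st.1 y, st.2 ++ [y]))
        (seen, q)).1) ∧
    (ys.foldl (fun (st : PySem.Set Int × List Int) y =>
        if PySem.Set.contains st.1 y then st else (PySem.Set.add st.1 y, st.2 ++ [y]))
        (seen, q)).2.Nodup ∧
    (ys.foldl (fun (st : PySem.Set Int × List Int) y =>
        if PySem.Set.contains st.1 y then st else (PySem.Set.add st.1 y, st.2 ++ [y]))
        (seen, q)).1.Nodup ∧
    (∀ y ∈ ys, y ∉ seen → y ∈ (ys.foldl (fun (st : PySem.Set Int × List Int) y =>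
        if PySem.Set.contains st.1 y then st else (PySem.Set.add st.1 y, st.2 ++ [y]))
        (seen, q)).2) ∧
    ((∀ y ∈ ys, y ∈ pvV l) →
      (ys.foldl (fun (st : PySem.Set Int × List Int) y =>
        if PySem.Set.contains st.1 y then st else (PySem.Set.add st.1 y, st.2 ++ [y]))
        (seen, q)).2.length + 2 * pvCnt l (ys.foldl (fun (st : PySem.Set Int × List Int) y =>
        if PySem.Set.contains st.1 y then st else (PySem.Set.add st.1 y, st.2 ++ [y]))
        (seen, q)).1 ≤ q.length + 2 * pvCnt l seen) := by
  induction ys generalizing seen q with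
  | nil =>
    simp only [List.foldl_nil]
    exact ⟨fun v => by simp, fun v hv => Or.inl hv, fun v hv => hv, fun v hv => hq v hv,
      hqn, hsn, fun y hy => absurd hy (List.not_mem_nil), fun _ => le_refl _⟩
  | cons y ys ih =>
    simp only [List.foldl_cons]
    by_cases hy : y ∈ seen
    · rw [if_pos (by simpa [PySem.Set.contains_iff] using hy)]
      obtain ⟨i1, i2, i3, i4, i5, i6, i7, i8⟩ := ih seen q hq hqn hsn
      refine ⟨?_, ?_, i3, i4, i5, i6, ?_, ?_⟩
      · intro v
        rw [i1 v]
        simp only [List.mem_cons]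
        constructor
        · rintro (h | h)
          · exact Or.inl h
          · exact Or.inr (Or.inr h)
        · rintro (h | h | h)
          · exact Or.inl h
          · exact Or.inl (h ▸ hy)
          · exact Or.inr h
      · intro v hv
        rcases i2 v hv with h | h
        · exact Or.inl h
        · exact Or.inr (List.mem_cons_of_mem _ h)
      · intro y' hy' hys
        rcases List.mem_cons.1 hy' with h | h
        · exact absurd (h ▸ hy) hys
        · exact i7 y' h hys
      · intro hys
        exact i8 (fun y' hy' => hys y' (List.mem_cons_of_mem _ hy'))
    · rw [if_neg (by simpa [PySem.Set.contains_iff] using hy)]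
      rw [show PySem.Set.add seen y = seen ++ [y] from PySem.Set.add_of_not_mem hy]
      have hynq : y ∉ q := fun h => hy (hq y h)
      have hq' : ∀ x ∈ q ++ [y], x ∈ seen ++ [y] := by
        intro x hx
        rcases List.mem_append.1 hx with h | h
        · exact List.mem_append.2 (Or.inl (hq x h))
        · exact List.mem_append.2 (Or.inr h)
      have hqn' : (q ++ [y]).Nodup := by
        refine hqn.append (List.nodup_singleton y) ?_
        intro a ha hb
        simp only [List.mem_singleton] at hb
        exact hynq (hb ▸ ha)
      have hsn' : (seen ++ [y]).Nodup := by
        refine hsn.append (List.nodup_singleton y) ?_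
        intro a ha hb
        simp only [List.mem_singleton] at hb
        exact hy (hb ▸ ha)
      obtain ⟨i1, i2, i3, i4, i5, i6, i7, i8⟩ := ih (seen ++ [y]) (q ++ [y]) hq' hqn' hsn'
      refine ⟨?_, ?_, ?_, i4, i5, i6, ?_, ?_⟩
      · intro v
        rw [i1 v]
        simp only [List.mem_append, List.mem_cons]
        tauto
      · intro v hv
        rcases i2 v hv with h | h
        · rcases List.mem_append.1 h with h' | h'
          · exact Or.inl h'
          · exact Or.inr (by simp at h'; simp [h'])
        · exact Or.inr (List.mem_cons_of_mem _ h)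
      · intro v hv
        exact i3 v (List.mem_append.2 (Or.inl hv))
      · intro y' hy' hys
        rcases List.mem_cons.1 hy' with h | h
        · subst h
          exact i3 y' (List.mem_append.2 (Or.inr (List.mem_singleton.2 rfl)))
        · by_cases h2 : y' ∈ seen ++ [y]
          · rcases List.mem_append.1 h2 with h3 | h3
            · exact absurd h3 hys
            · simp only [List.mem_singleton] at h3
              subst h3
              exact i3 y' (List.mem_append.2 (Or.inr (List.mem_singleton.2 rfl)))
          · exact i7 y' h h2
      · intro hys
        have hyV : y ∈ pvV l := hys y (List.mem_cons_self)
        have hstep := pvCnt_step (l := l) hyV hy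
        have := i8 (fun y' hy' => hys y' (List.mem_cons_of_mem _ hy'))
        simp only [List.length_append, List.length_singleton] at this
        omega

theorem bfs_main (l : List (Int × Int × Int)) (neigh : PySem.Dict Int (PySem.Set Int))
    (hN : ∀ x y, y ∈ neigh.getD x PySem.Set.empty ↔ pvRel l x y) :
    ∀ (fuel : Nat) (seen : PySem.Set Int) (q : List Int),
    (∀ x ∈ q, x ∈ seen) → q.Nodup → seen.Nodup →
    (∀ x ∈ seen, x ∉ q → ∀ y, pvRel l x y → y ∈ seen) →
    q.length + 2 * pvCnt l seen ≤ fuel →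
    (∀ v ∈ seen, v ∈ pvBfs neigh fuel seen q) ∧
    (∀ v ∈ pvBfs neigh fuel seen q, ∃ x ∈ seen, pvReach l x v) ∧
    (∀ x ∈ pvBfs neigh fuel seen q, ∀ y, pvRel l x y → y ∈ pvBfs neigh fuel seen q) := by
  intro fuel
  induction fuel with
  | zero =>
    intro seen q hq hqn hsn hcl hfuel
    have hq0 : q = [] := by
      cases q with
      | nil => rfl
      | cons a t => simp only [List.length_cons] at hfuel; omega
    subst hq0
    simp only [pvBfs]
    exact ⟨fun v hv => hv, fun v hv => ⟨v, hv, Relation.ReflTransGen.refl⟩,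
      fun x hx y hxy => hcl x hx (List.not_mem_nil) y hxy⟩
  | succ fuel ih =>
    intro seen q hq hqn hsn hcl hfuel
    cases q with
    | nil =>
      simp only [pvBfs]
      exact ⟨fun v hv => hv, fun v hv => ⟨v, hv, Relation.ReflTransGen.refl⟩,
        fun x hx y hxy => hcl x hx (List.not_mem_nil) y hxy⟩
    | cons x0 q' =>
      have hq' : ∀ x ∈ q', x ∈ seen := fun x hx => hq x (List.mem_cons_of_mem _ hx)
      have hqn' : q'.Nodup := hqn.of_cons
      obtain ⟨i1, i2, i3, i4, i5, i6, i7, i8⟩ :=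
        bfs_inner l (neigh.getD x0 PySem.Set.empty) seen q' hq' hqn' hsn
      have hys : ∀ y ∈ neigh.getD x0 PySem.Set.empty, y ∈ pvV l :=
        fun y hy => pvRel_mem_right ((hN x0 y).1 hy)
      have hfuel' : (((neigh.getD x0 PySem.Set.empty).foldl
          (fun (st : PySem.Set Int × List Int) y =>
            if PySem.Set.contains st.1 y then st else (PySem.Set.add st.1 y, st.2 ++ [y]))
          (seen, q')).2.length + 2 * pvCnt l (((neigh.getD x0 PySem.Set.empty).foldl
          (fun (st : PySem.Set Int × List Int) y =>
            if PySem.Set.contains st.1 y then st else (PySem.Set.add st.1 y, st.2 ++ [y]))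
          (seen, q')).1)) ≤ fuel := by
        have := i8 hys
        simp only [List.length_cons] at hfuel
        omega
      have hcl2 : ∀ x ∈ (((neigh.getD x0 PySem.Set.empty).foldl
          (fun (st : PySem.Set Int × List Int) y =>
            if PySem.Set.contains st.1 y then st else (PySem.Set.add st.1 y, st.2 ++ [y]))
          (seen, q')).1), x ∉ (((neigh.getD x0 PySem.Set.empty).foldl
          (fun (st : PySem.Set Int × List Int) y =>
            if PySem.Set.contains st.1 y then st else (PySem.Set.add st.1 y, st.2 ++ [y]))
          (seen, q')).2) → ∀ y, pvRel l x y → y ∈ (((neigh.getD x0 PySem.Set.empty).foldl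
          (fun (st : PySem.Set Int × List Int) y =>
            if PySem.Set.contains st.1 y then st else (PySem.Set.add st.1 y, st.2 ++ [y]))
          (seen, q')).1) := by
        intro x hx hxq y hxy
        by_cases hxs : x ∈ seen
        · by_cases hx0 : x = x0
          · subst hx0
            exact (i1 y).2 (Or.inr ((hN x y).2 hxy))
          · have hq'' : x ∉ q' := fun h => hxq (i3 x h)
            have hnotin : x ∉ x0 :: q' := by
              intro h
              rcases List.mem_cons.1 h with h | h
              · exact hx0 h
              · exact hq'' h
            exact (i1 y).2 (Or.inl (hcl x hxs hnotin y hxy))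
        · have hxys : x ∈ neigh.getD x0 PySem.Set.empty := ((i1 x).1 hx).resolve_left hxs
          exact absurd (i7 x hxys hxs) hxq
      obtain ⟨j1, j2, j3⟩ := ih _ _ i4 i5 i6 hcl2 hfuel'
      refine ⟨?_, ?_, j3⟩
      · intro v hv
        exact j1 v ((i1 v).2 (Or.inl hv))
      · intro v hv
        obtain ⟨x, hx, hr⟩ := j2 v hv
        rcases (i1 x).1 hx with hxs | hxys
        · exact ⟨x, hxs, hr⟩
        · exact ⟨x0, hq x0 List.mem_cons_self,
            Relation.ReflTransGen.head ((hN x0 x).1 hxys) hr⟩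

theorem bfs_reach (l : List (Int × Int × Int)) (neigh : PySem.Dict Int (PySem.Set Int))
    (hN : ∀ x y, y ∈ neigh.getD x PySem.Set.empty ↔ pvRel l x y) (start v : Int) :
    v ∈ pvBfs neigh (4 * l.length + 2) (PySem.Set.ofList [start]) [start] ↔
      pvReach l start v := by
  have h1 : PySem.Set.ofList [start] = [start] :=
    PySem.Set.ofList_eq_self_of_nodup _ (List.nodup_singleton _)
  rw [h1]
  have hfuel : ([start] : List Int).length + 2 * pvCnt l [start] ≤ 4 * l.length + 2 := by
    have := pvCnt_le l [start]
    simp only [List.length_singleton]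
    omega
  obtain ⟨j1, j2, j3⟩ := bfs_main l neigh hN (4 * l.length + 2) [start] [start]
    (fun x hx => hx) (List.nodup_singleton _) (List.nodup_singleton _)
    (fun x hx hxq => absurd hx hxq) hfuel
  constructor
  · intro hv
    obtain ⟨x, hx, hr⟩ := j2 v hv
    simp only [List.mem_singleton] at hx
    exact hx ▸ hr
  · intro hr
    exact pvReach_closed (j1 start (List.mem_singleton.2 rfl)) j3 hr

-- ===== B's relaxation =====
theorem relaxStep_skip (st : PySem.Set Int × Bool) (e : Int × Int × Int)
    (hm : ¬ 0 < e.2.2) : pvRelaxStep st e = st := by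
  simp [pvRelaxStep, hm]

theorem relaxStep_both (st : PySem.Set Int × Bool) (e : Int × Int × Int)
    (hm : 0 < e.2.2) (hu : e.1 ∈ st.1) (hv : e.2.1 ∈ st.1) : pvRelaxStep st e = st := by
  simp [pvRelaxStep, hm, hu, hv]

theorem relaxStep_none (st : PySem.Set Int × Bool) (e : Int × Int × Int)
    (hm : 0 < e.2.2) (hu : e.1 ∉ st.1) (hv : e.2.1 ∉ st.1) : pvRelaxStep st e = st := by
  simp [pvRelaxStep, hm, hu, hv]

theorem relaxStep_addv (st : PySem.Set Int × Bool) (e : Int × Int × Int)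
    (hm : 0 < e.2.2) (hu : e.1 ∈ st.1) (hv : e.2.1 ∉ st.1) :
    pvRelaxStep st e = (st.1 ++ [e.2.1], true) := by
  have hu2 : e.1 ∈ st.1 ++ [e.2.1] := List.mem_append.2 (Or.inl hu)
  simp [pvRelaxStep, hm, hu, hv, hu2]

theorem relaxStep_addu (st : PySem.Set Int × Bool) (e : Int × Int × Int)
    (hm : 0 < e.2.2) (hu : e.1 ∉ st.1) (hv : e.2.1 ∈ st.1) :
    pvRelaxStep st e = (st.1 ++ [e.1], true) := by
  simp [pvRelaxStep, hm, hu, hv]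

theorem pass_aux (l : List (Int × Int × Int)) (start : Int) :
    ∀ (sub : List (Int × Int × Int)), (∀ e ∈ sub, e ∈ l) →
    ∀ (seen : PySem.Set Int) (b : Bool),
    ∃ extra : List Int,
      (sub.foldl pvRelaxStep (seen, b)).1 = seen ++ extra ∧
      (sub.foldl pvRelaxStep (seen, b)).2 = (b || !extra.isEmpty) ∧
      (∀ y ∈ extra, y ∈ pvV l) ∧
      ((∀ x ∈ seen, pvReach l start x) → ∀ y ∈ extra, pvReach l start y) ∧
      (seen.Nodup → (seen ++ extra).Nodup) ∧
      ((sub.foldl pvRelaxStep (seen, b)).2 = false →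
        ∀ e ∈ sub, 0 < e.2.2 → (e.1 ∈ seen ↔ e.2.1 ∈ seen)) := by
  intro sub
  induction sub with
  | nil =>
    intro _ seen b
    exact ⟨[], by simp, by simp, by simp, fun _ y hy => absurd hy (List.not_mem_nil),
      fun h => by simpa using h, fun _ e he => absurd he (List.not_mem_nil)⟩
  | cons e rest ih =>
    intro hsub seen b
    have hsub' : ∀ e' ∈ rest, e' ∈ l := fun e' he' => hsub e' (List.mem_cons_of_mem _ he')
    have hel : e ∈ l := hsub e List.mem_cons_self
    simp only [List.foldl_cons]
    by_cases hm : 0 < e.2.2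
    · by_cases hu : e.1 ∈ seen <;> by_cases hv : e.2.1 ∈ seen
      · rw [relaxStep_both (seen, b) e hm hu hv]
        obtain ⟨extra, p1, p2, p3, p4, p5, p6⟩ := ih hsub' seen b
        refine ⟨extra, p1, p2, p3, p4, p5, ?_⟩
        intro hf e' he' hm'
        rcases List.mem_cons.1 he' with h | h
        · subst h; exact ⟨fun _ => hv, fun _ => hu⟩
        · exact p6 hf e' h hm'
      · rw [relaxStep_addv (seen, b) e hm hu hv]
        obtain ⟨extra, p1, p2, p3, p4, p5, p6⟩ := ih hsub' (seen ++ [e.2.1]) true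
        refine ⟨e.2.1 :: extra, ?_, ?_, ?_, ?_, ?_, ?_⟩
        · rw [p1, List.append_assoc]; rfl
        · rw [p2]; simp
        · intro y hy
          rcases List.mem_cons.1 hy with h | h
          · exact h ▸ mem_pvV.2 ⟨e, hel, hm, Or.inr rfl⟩
          · exact p3 y h
        · intro hseen y hy
          have hrv : pvReach l start e.2.1 :=
            Relation.ReflTransGen.tail (hseen e.1 hu) ⟨e, hel, hm, Or.inl ⟨rfl, rfl⟩⟩
          have hseen' : ∀ x ∈ seen ++ [e.2.1], pvReach l start x := by
            intro x hx
            rcases List.mem_append.1 hx with h | h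
            · exact hseen x h
            · simp only [List.mem_singleton] at h; exact h ▸ hrv
          rcases List.mem_cons.1 hy with h | h
          · exact h ▸ hrv
          · exact p4 hseen' y h
        · intro hsn
          have hsn' : (seen ++ [e.2.1]).Nodup := by
            refine hsn.append (List.nodup_singleton _) ?_
            intro a ha hb
            simp only [List.mem_singleton] at hb
            exact hv (hb ▸ ha)
          have := p5 hsn'
          rwa [List.append_assoc] at this
        · intro hf
          rw [p2] at hf
          simp at hf
      · rw [relaxStep_addu (seen, b) e hm hu hv]
        obtain ⟨extra, p1, p2, p3, p4, p5, p6⟩ := ih hsub' (seen ++ [e.1]) true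
        refine ⟨e.1 :: extra, ?_, ?_, ?_, ?_, ?_, ?_⟩
        · rw [p1, List.append_assoc]; rfl
        · rw [p2]; simp
        · intro y hy
          rcases List.mem_cons.1 hy with h | h
          · exact h ▸ mem_pvV.2 ⟨e, hel, hm, Or.inl rfl⟩
          · exact p3 y h
        · intro hseen y hy
          have hrv : pvReach l start e.1 :=
            Relation.ReflTransGen.tail (hseen e.2.1 hv) ⟨e, hel, hm, Or.inr ⟨rfl, rfl⟩⟩
          have hseen' : ∀ x ∈ seen ++ [e.1], pvReach l start x := by
            intro x hx
            rcases List.mem_append.1 hx with h | h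
            · exact hseen x h
            · simp only [List.mem_singleton] at h; exact h ▸ hrv
          rcases List.mem_cons.1 hy with h | h
          · exact h ▸ hrv
          · exact p4 hseen' y h
        · intro hsn
          have hsn' : (seen ++ [e.1]).Nodup := by
            refine hsn.append (List.nodup_singleton _) ?_
            intro a ha hb
            simp only [List.mem_singleton] at hb
            exact hu (hb ▸ ha)
          have := p5 hsn'
          rwa [List.append_assoc] at this
        · intro hf
          rw [p2] at hf
          simp at hf
      · rw [relaxStep_none (seen, b) e hm hu hv]
        obtain ⟨extra, p1, p2, p3, p4, p5, p6⟩ := ih hsub' seen b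
        refine ⟨extra, p1, p2, p3, p4, p5, ?_⟩
        intro hf e' he' hm'
        rcases List.mem_cons.1 he' with h | h
        · subst h; exact ⟨fun h => absurd h hu, fun h => absurd h hv⟩
        · exact p6 hf e' h hm'
    · rw [relaxStep_skip (seen, b) e hm]
      obtain ⟨extra, p1, p2, p3, p4, p5, p6⟩ := ih hsub' seen b
      refine ⟨extra, p1, p2, p3, p4, p5, ?_⟩
      intro hf e' he' hm'
      rcases List.mem_cons.1 he' with h | h
      · subst h; exact absurd hm' hm
      · exact p6 hf e' h hm'

theorem close_main (l : List (Int × Int × Int)) (start : Int) :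
    ∀ (fuel : Nat) (seen : PySem.Set Int),
    seen.Nodup → (∀ x ∈ seen, x = start ∨ x ∈ pvV l) →
    (∀ x ∈ seen, pvReach l start x) → start ∈ seen →
    (pvV l).length + 2 ≤ fuel + seen.length →
    ∀ v, v ∈ pvClose l fuel seen ↔ pvReach l start v := by
  intro fuel
  induction fuel with
  | zero =>
    intro seen hsn hsub hsound hstart hfuel
    exfalso
    have hsp : List.Subperm seen (start :: pvV l) := by
      apply List.subperm_of_subset hsn
      intro x hx
      rcases hsub x hx with h | h
      · exact h ▸ List.mem_cons_self
      · exact List.mem_cons_of_mem _ h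
    have := hsp.length_le
    simp only [List.length_cons] at this
    omega
  | succ fuel ih =>
    intro seen hsn hsub hsound hstart hfuel
    obtain ⟨extra, p1, p2, p3, p4, p5, p6⟩ := pass_aux l start l (fun e he => he) seen false
    have hpass1 : (pvRelaxPass l seen).1 = seen ++ extra := p1
    have hpass2 : (pvRelaxPass l seen).2 = (false || !extra.isEmpty) := p2
    intro v
    show v ∈ (if (pvRelaxPass l seen).2 then pvClose l fuel (pvRelaxPass l seen).1
      else (pvRelaxPass l seen).1) ↔ pvReach l start v
    cases hex : extra with
    | nil =>
      have hflag : (pvRelaxPass l seen).2 = false := by show (List.foldl pvRelaxStep (seen, false) l).2 = false; rw [p2, hex]; rfl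
      rw [hflag]
      simp only [Bool.false_eq_true, if_false, hpass1, hex, List.append_nil]
      constructor
      · exact hsound v
      · refine pvReach_closed hstart ?_
        intro x hx y hxy
        obtain ⟨e, he, hm, ho⟩ := hxy
        have hiff := p6 (by rw [p2, hex]; rfl) e he hm
        rcases ho with ⟨h1, h2⟩ | ⟨h1, h2⟩
        · exact h2 ▸ (hiff.1 (h1 ▸ hx))
        · exact h1 ▸ (hiff.2 (h2 ▸ hx))
    | cons a t =>
      have hflag : (pvRelaxPass l seen).2 = true := by show (List.foldl pvRelaxStep (seen, false) l).2 = true; rw [p2, hex]; rfl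
      rw [hflag]
      simp only [if_true]
      rw [hpass1]
      apply ih (seen ++ extra)
      · exact p5 hsn
      · intro x hx
        rcases List.mem_append.1 hx with h | h
        · exact hsub x h
        · exact Or.inr (p3 x h)
      · intro x hx
        rcases List.mem_append.1 hx with h | h
        · exact hsound x h
        · exact p4 hsound x h
      · exact List.mem_append.2 (Or.inl hstart)
      · have : 0 < extra.length := by rw [hex]; simp
        simp only [List.length_append]
        omega

theorem close_reach (l : List (Int × Int × Int)) (start : Int) (v : Int) :
    v ∈ pvClose l (2 * l.length + 2) (PySem.Set.ofList [start]) ↔ pvReach l start v := by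
  have h1 : PySem.Set.ofList [start] = [start] :=
    PySem.Set.ofList_eq_self_of_nodup _ (List.nodup_singleton _)
  rw [h1]
  apply close_main l start
  · exact List.nodup_singleton _
  · intro x hx
    simp only [List.mem_singleton] at hx
    exact Or.inl hx
  · intro x hx
    simp only [List.mem_singleton] at hx
    exact hx ▸ Relation.ReflTransGen.refl
  · exact List.mem_singleton.2 rfl
  · have := length_pvV_le l
    simp only [List.length_singleton]
    omega

theorem all_contains_congr (xs : List Int) (s t : PySem.Set Int)
    (h : ∀ v, v ∈ s ↔ v ∈ t) :
    xs.all (fun v => PySem.Set.contains s v) = xs.all (fun v => PySem.Set.contains t v) := by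
  rw [Bool.eq_iff_iff]
  simp only [List.all_eq_true, PySem.Set.contains_iff]
  constructor
  · intro ha v hv
    exact (h v).1 (ha v hv)
  · intro ha v hv
    exact (h v).2 (ha v hv)


-- ===== VERDICT (by name: the statement is the Claim_ definition above) =====
theorem is_connected_eulerian_even_spec : Claim_equal_is_connected_eulerian_even := by
  intro l _
  unfold Spec_is_connected_eulerian_even
  simp only [is_connected_eulerian_even, is_connected_eulerian_even_alt]
  by_cases hg : (((l.map (fun e => e.2.2)).sum == 0 ||
      PySem.Int.mod ((l.map (fun e => e.2.2)).sum) 2 != 0) = true)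
  · rw [if_pos hg, if_pos hg]
  · rw [if_neg hg, if_neg hg]
    have hdeg : (l.foldl pvStepA (PySem.Dict.empty, PySem.Dict.empty)).1 =
        l.foldl pvStepB PySem.Dict.empty := degA_eq_degB l _ _
    rw [hdeg, support_eq_keys l]
    have hnd : (l.foldl pvStepB PySem.Dict.empty).keys.Nodup :=
      nodup_keys_degB l _ (by simp [PySem.Dict.keys_empty])
    have hval : (l.foldl pvStepB PySem.Dict.empty).values.any
        (fun d => PySem.Int.mod d 2 != 0) = (l.foldl pvStepB PySem.Dict.empty).keys.any
        (fun v => PySem.Int.mod ((l.foldl pvStepB PySem.Dict.empty).getD v 0) 2 != 0) := by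
      rw [PySem.Dict.values_eq_map_keys _ hnd 0, List.any_map]
      rfl
    rw [hval]
    have hN : ∀ x y, y ∈ ((l.foldl pvStepA (PySem.Dict.empty, PySem.Dict.empty)).2.getD x
        PySem.Set.empty) ↔ pvRel l x y := by
      intro x y
      rw [mem_neighA l PySem.Dict.empty PySem.Dict.empty (fun _ _ => False)
        (by intro x y; simp [PySem.Dict.getD_empty, PySem.Set.empty]) x y]
      tauto
    cases hK : (l.foldl pvStepB PySem.Dict.empty).keys with
    | nil => rfl
    | cons start rest =>
      have main : (if ((start :: rest).any (fun v =>
            PySem.Int.mod ((l.foldl pvStepB PySem.Dict.empty).getD v 0) 2 != 0)) = true then false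
          else (start :: rest).all fun v =>
            (pvBfs (l.foldl pvStepA (PySem.Dict.empty, PySem.Dict.empty)).2
              (4 * l.length + 2) (PySem.Set.ofList [start]) [start]).contains v)
          = (if ((start :: rest).any (fun v =>
            PySem.Int.mod ((l.foldl pvStepB PySem.Dict.empty).getD v 0) 2 != 0)) = true then false
          else (start :: rest).all fun v =>
            (pvClose l (2 * l.length + 2) (PySem.Set.ofList [start])).contains v) := by
        by_cases hp : ((start :: rest).any (fun v =>
            PySem.Int.mod ((l.foldl pvStepB PySem.Dict.empty).getD v 0) 2 != 0)) = true
        · rw [if_pos hp, if_pos hp]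
        · rw [if_neg hp, if_neg hp]
          apply all_contains_congr
          intro v
          rw [bfs_reach l _ hN start v, close_reach l start v]
      exact main
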